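-- pv_equiv track=rewrite | github.com/bitshoroscope/google-challenge | src/level_3/queue_to_do.py | solution
-- ===== SOURCE A (Python) =====
-- def solution(start, length):
--     step = length
--     end = start + length ** 2
--     res = 0
--     while start < end:
--         min = start
--         max = start + length - 1
--         start += step
--         length -= 1
--         if min != max:
--             res ^= xor_range(min,max)
--         else:
--             res ^= min
--     return res
--
-- def xor_to(n):
--     modulus = n & 3  # n % 4
--
--     if modulus == 0:
--         return n
--
--     if modulus == 1:
--         return 1
--
--     if modulus == 2:
--         return n + 1
--
--     return 0
--
-- def xor_range(a, b):
--     """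
--     Return the XOR of numbers from A to B.
--     """
--     return xor_to(b) ^ xor_to(a - 1)
-- ===== SOURCE B (Python) =====
-- def solution(start, length):
--     # XOR the grid cells directly, row by row, but skip whole 4-aligned blocks:
--     # any block [4a, 4a+3] of four consecutive integers XORs to 0, so only the
--     # ragged edges of each row (at most ~6 cells) are actually XORed in.
--     res = 0
--     n = length
--     for k in range(n):
--         lo = start + k * n
--         hi = lo + (n - k) - 1
--         while lo <= hi and lo % 4 != 0:
--             res ^= lo
--             lo += 1
--         lo += ((hi - lo + 1) // 4) * 4
--         while lo <= hi:
--             res ^= lo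
--             lo += 1
--     return res
-- ===== Notes on version B (the rewrite author's own statement) =====
-- stated objective: alternative
-- what changed: Dropped A's xor_to/xor_range mod-4 lookup-table helpers entirely: B walks each row's actual cells with explicit element-by-element XOR loops, jumping over whole 4-aligned blocks (any [4a,4a+3] XORs to 0), so only the ragged edges of each row are ever touched.
import Mathlib
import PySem

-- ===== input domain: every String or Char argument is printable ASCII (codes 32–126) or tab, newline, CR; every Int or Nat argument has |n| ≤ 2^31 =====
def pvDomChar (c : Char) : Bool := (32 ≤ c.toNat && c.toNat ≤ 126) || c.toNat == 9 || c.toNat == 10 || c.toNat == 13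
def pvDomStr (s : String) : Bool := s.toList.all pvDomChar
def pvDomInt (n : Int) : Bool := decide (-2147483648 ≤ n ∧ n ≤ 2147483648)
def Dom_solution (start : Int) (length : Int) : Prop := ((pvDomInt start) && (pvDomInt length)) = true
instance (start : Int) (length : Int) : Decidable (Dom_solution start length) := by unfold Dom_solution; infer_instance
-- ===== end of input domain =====

-- B drops A's closed-form xor_to/xor_range helpers entirely: it XORs each row's cells
-- element by element with explicit loops, jumping over whole 4-aligned blocks (any
-- [4a, 4a+3] XORs to 0), so only the ragged edges of a row are ever touched.
-- Python's `&` and `^` on int are ported with Mathlib's Int.land / Int.xor, which are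
-- exact two's-complement bitwise operations like Python's.

-- ===== PORT A =====
def xor_to (n : Int) : Int :=
  let modulus := Int.land n 3
  if modulus = 0 then n
  else if modulus = 1 then 1
  else if modulus = 2 then n + 1
  else 0

def xor_range (a : Int) (b : Int) : Int :=
  Int.xor (xor_to b) (xor_to (a - 1))

-- the while loop of A; fuel = number of remaining iterations (the loop runs exactly
-- `length` times when 0 ≤ length, which Pre_solution guarantees; for negative length
-- Python diverges and those inputs are outside Pre_solution)
def solutionLoop : Nat → Int → Int → Int → Int → Int → Int
  | 0, _, _, _, _, res => res
  | f + 1, start, end_, step, length, res =>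
    if start < end_ then
      let mn := start
      let mx := start + length - 1
      let res' := if mn ≠ mx then Int.xor res (xor_range mn mx) else Int.xor res mn
      solutionLoop f (start + step) end_ step (length - 1) res'
    else res

def solution (start : Int) (length : Int) : Int :=
  solutionLoop length.toNat start (start + length ^ 2) length length 0

-- ===== PORT B =====
-- Source B's first inner while: XOR cells one by one until lo is 4-aligned (or past hi);
-- returns the updated (res, lo)
def alignLoop (res lo hi : Int) : Int × Int :=
  if h : lo ≤ hi ∧ PySem.Int.mod lo 4 ≠ 0 then alignLoop (Int.xor res lo) (lo + 1) hi
  else (res, lo)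
termination_by (hi + 1 - lo).toNat
decreasing_by omega

-- Source B's second inner while: XOR the remaining cells one by one
def tailLoop (res lo hi : Int) : Int :=
  if h : lo ≤ hi then tailLoop (Int.xor res lo) (lo + 1) hi
  else res
termination_by (hi + 1 - lo).toNat
decreasing_by omega

-- Source B's outer for-loop over the rows
def solution_alt (start : Int) (length : Int) : Int :=
  (PySem.List.pyRange 0 length 1).foldl
    (fun res k =>
      let lo := start + k * length
      let hi := lo + (length - k) - 1
      let p := alignLoop res lo hi
      let lo2 := p.2 + (PySem.Int.floordiv (hi - p.2 + 1) 4) * 4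
      tailLoop p.1 lo2 hi)
    0

-- ===== PRECONDITION & SPEC =====
-- Pre_ excludes only length < 0, on which A's while loop never terminates (step < 0).
def Pre_solution (start : Int) (length : Int) : Prop := 0 ≤ length
instance (start : Int) (length : Int) : Decidable (Pre_solution start length) := by
  unfold Pre_solution; infer_instance

def pvWitness_solution : Int × Int := (-7, 5)

def Spec_solution (start : Int) (length : Int) (out : Int) : Prop := out = solution_alt start length
instance (start : Int) (length : Int) (out : Int) : Decidable (Spec_solution start length out) := by
  unfold Spec_solution; infer_instance

-- ===== CLAIM (what is proved, stated in full; the proofs are below) =====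
def Claim_equal_solution : Prop := ∀ (start : Int) (length : Int), Dom_solution start length → Pre_solution start length → Spec_solution start length (solution start length)

-- ===== LEMMAS AND PROOFS =====

-- basic algebra of Int.xor
theorem ixor_comm (m n : Int) : Int.xor m n = Int.xor n m := by
  cases m <;> cases n <;> simp [Int.xor, Nat.xor_comm]

theorem ixor_assoc (a b c : Int) : Int.xor (Int.xor a b) c = Int.xor a (Int.xor b c) := by
  cases a <;> cases b <;> cases c <;> simp [Int.xor, Nat.xor_assoc]

theorem ixor_self (n : Int) : Int.xor n n = 0 := by
  cases n <;> simp [Int.xor]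

theorem zero_ixor (n : Int) : Int.xor 0 n = n := by
  cases n <;> simp [Int.xor]

theorem ixor_zero (n : Int) : Int.xor n 0 = n := by
  cases n <;> simp [Int.xor]

theorem iland_zero (q : Int) : Int.land q 0 = 0 := by
  cases q <;> simp [Int.land, Nat.ldiff]

-- writing small numbers and 4q+r as two-level bit patterns
theorem bit_ff (q : Int) : Int.bit false q = 2 * q := by simp [Int.bit_val]
theorem bit_tt (q : Int) : Int.bit true q = 2 * q + 1 := by simp [Int.bit_val]

theorem one_bits : (1 : Int) = Int.bit true 0 := by simp [Int.bit_val]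

theorem three_bits : (3 : Int) = Int.bit true (Int.bit true 0) := by
  simp [Int.bit_val]

theorem land3_bits (b0 b1 : Bool) (q : Int) :
    Int.land (Int.bit b0 (Int.bit b1 q)) 3 = Int.bit (b0 && true) (Int.bit (b1 && true) 0) := by
  rw [three_bits, Int.land_bit, Int.land_bit, iland_zero]

theorem land3_0 (q : Int) : Int.land (4 * q) 3 = 0 := by
  have h : (4 * q : Int) = Int.bit false (Int.bit false q) := by rw [bit_ff, bit_ff]; ring
  rw [h, land3_bits]; simp [Int.bit_val]

theorem land3_1 (q : Int) : Int.land (4 * q + 1) 3 = 1 := by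
  have h : (4 * q + 1 : Int) = Int.bit true (Int.bit false q) := by rw [bit_tt, bit_ff]; ring
  rw [h, land3_bits]; simp [Int.bit_val]

theorem land3_2 (q : Int) : Int.land (4 * q + 2) 3 = 2 := by
  have h : (4 * q + 2 : Int) = Int.bit false (Int.bit true q) := by rw [bit_ff, bit_tt]; ring
  rw [h, land3_bits]; simp [Int.bit_val]

theorem land3_3 (q : Int) : Int.land (4 * q + 3) 3 = 3 := by
  have h : (4 * q + 3 : Int) = Int.bit true (Int.bit true q) := by rw [bit_tt, bit_tt]; ring
  rw [h, land3_bits]; simp [Int.bit_val]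

theorem xor_to_0 (q : Int) : xor_to (4 * q) = 4 * q := by
  simp [xor_to, land3_0]

theorem xor_to_1 (q : Int) : xor_to (4 * q + 1) = 1 := by
  simp [xor_to, land3_1]

theorem xor_to_2 (q : Int) : xor_to (4 * q + 2) = 4 * q + 3 := by
  simp [xor_to, land3_2]
  ring

theorem xor_to_3 (q : Int) : xor_to (4 * q + 3) = 0 := by
  simp [xor_to, land3_3]

-- small xor identities
theorem xor_even_one (m : Int) : Int.xor (2 * m) 1 = 2 * m + 1 := by
  rw [one_bits, show (2 * m : Int) = Int.bit false m from (bit_ff m).symm, Int.lxor_bit,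
    ixor_zero]
  simp [Int.bit_val]

theorem xor_4q_4q1 (q : Int) : Int.xor (4 * q) (4 * q + 1) = 1 := by
  have h2 : (4 * q + 1 : Int) = Int.bit true (2 * q) := by rw [bit_tt]; ring
  have h1 : (4 * q : Int) = Int.bit false (2 * q) := by rw [bit_ff]; ring
  rw [h2, h1, Int.lxor_bit, ixor_self]
  simp [Int.bit_val]

theorem xor_one_4q2 (q : Int) : Int.xor 1 (4 * q + 2) = 4 * q + 3 := by
  rw [ixor_comm, show (4 * q + 2 : Int) = 2 * (2 * q + 1) by ring, xor_even_one]
  ring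

-- the prefix-XOR recurrence: xor_to (h+1) = xor_to h ^ (h+1)
theorem xor_to_succ (h : Int) : Int.xor (xor_to h) (h + 1) = xor_to (h + 1) := by
  obtain ⟨q, hq⟩ : ∃ q, h = 4 * q + h % 4 := ⟨h / 4, by omega⟩
  have h4 : h % 4 = 0 ∨ h % 4 = 1 ∨ h % 4 = 2 ∨ h % 4 = 3 := by omega
  rcases h4 with e | e | e | e <;> rw [e] at hq
  · rw [show h = 4 * q by omega, xor_to_0, show (4 * q + 1 : Int) = 4 * q + 1 by ring,
      xor_to_1, xor_4q_4q1]
  · rw [show h = 4 * q + 1 by omega, xor_to_1, show (4 * q + 1 + 1 : Int) = 4 * q + 2 by ring,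
      xor_to_2, xor_one_4q2]
  · rw [show h = 4 * q + 2 by omega, xor_to_2, show (4 * q + 2 + 1 : Int) = 4 * q + 3 by ring,
      xor_to_3, ixor_self]
  · rw [show h = 4 * q + 3 by omega, xor_to_3, show (4 * q + 3 + 1 : Int) = 4 * (q + 1) by ring,
      xor_to_0, zero_ixor]

theorem xor_range_self (a : Int) : xor_range a a = a := by
  have hs := xor_to_succ (a - 1)
  rw [show a - 1 + 1 = a by ring] at hs
  unfold xor_range
  rw [← hs, ixor_comm (xor_to (a - 1)) a, ixor_assoc, ixor_self, ixor_zero]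

-- "empty range": xor_range (h+1) h = 0
theorem xor_range_empty (h : Int) : xor_range (h + 1) h = 0 := by
  unfold xor_range
  rw [show h + 1 - 1 = h by ring, ixor_self]

-- a ^ (b ^ (c ^ a)) = b ^ c
theorem xor_shuffle (a b c : Int) : Int.xor a (Int.xor b (Int.xor c a)) = Int.xor b c := by
  rw [ixor_comm c a, show Int.xor b (Int.xor a c) = Int.xor (Int.xor b a) c from
      (ixor_assoc b a c).symm, ixor_comm b a, ixor_assoc a b c, ← ixor_assoc a a,
    ixor_self, zero_ixor]

-- peeling the first element off a range (pure algebra of xor_to, unconditional)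
theorem xor_range_cons (lo hi : Int) :
    Int.xor lo (xor_range (lo + 1) hi) = xor_range lo hi := by
  have hs := xor_to_succ (lo - 1)
  rw [show lo - 1 + 1 = lo by ring] at hs
  unfold xor_range
  rw [show lo + 1 - 1 = lo by ring, ← hs, xor_shuffle]

-- splitting a range at any point (pure algebra, unconditional)
theorem xor_range_split (a m h : Int) :
    Int.xor (xor_range a (m - 1)) (xor_range m h) = xor_range a h := by
  unfold xor_range
  rw [ixor_comm (xor_to (m - 1)) (xor_to (a - 1)), ixor_assoc,
    ixor_comm (xor_to h) (xor_to (m - 1)), ← ixor_assoc (xor_to (m - 1)),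
    ixor_self, zero_ixor, ixor_comm]

-- a 4-aligned block of 4t consecutive integers XORs to 0
theorem xr_skip (a t : Int) (ht : 0 ≤ t) : xor_range (4 * a) (4 * a + 4 * t - 1) = 0 := by
  rcases eq_or_lt_of_le ht with h0 | hpos
  · rw [show 4 * a + 4 * t - 1 = 4 * a - 1 by omega]
    unfold xor_range
    exact ixor_self _
  · obtain ⟨s, hs, rfl⟩ : ∃ s, 0 ≤ s ∧ t = s + 1 := ⟨t - 1, by omega, by ring⟩
    unfold xor_range
    rw [show 4 * a + 4 * (s + 1) - 1 = 4 * (a + s) + 3 by ring,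
      show 4 * a - 1 = 4 * (a - 1) + 3 by ring, xor_to_3, xor_to_3, ixor_self]

-- B's second inner loop accumulates the XOR of [lo, hi] (empty when lo = hi + 1)
theorem tail_char (hi : Int) : ∀ (res lo : Int), lo ≤ hi + 1 →
    tailLoop res lo hi = Int.xor res (xor_range lo hi) := by
  intro res lo
  refine tailLoop.induct hi
    (fun res lo => lo ≤ hi + 1 → tailLoop res lo hi = Int.xor res (xor_range lo hi))
    ?_ ?_ res lo
  · intro res lo h ih _
    rw [tailLoop, dif_pos h, ih (by omega), ixor_assoc, xor_range_cons]
  · intro res lo h hle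
    rw [tailLoop, dif_neg h, show lo = hi + 1 by omega, xor_range_empty, ixor_zero]

-- B's whole row body (align, skip aligned 4-blocks, finish) computes res ^ xor_range lo hi
theorem row_char (hi : Int) : ∀ (res lo : Int), lo ≤ hi + 1 →
    tailLoop (alignLoop res lo hi).1
      ((alignLoop res lo hi).2 +
        (PySem.Int.floordiv (hi - (alignLoop res lo hi).2 + 1) 4) * 4) hi
      = Int.xor res (xor_range lo hi) := by
  intro res lo
  refine alignLoop.induct hi
    (fun res lo => lo ≤ hi + 1 →
      tailLoop (alignLoop res lo hi).1
        ((alignLoop res lo hi).2 +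
          (PySem.Int.floordiv (hi - (alignLoop res lo hi).2 + 1) 4) * 4) hi
        = Int.xor res (xor_range lo hi))
    ?_ ?_ res lo
  · intro res lo h ih _
    rw [alignLoop, dif_pos h, ih (by omega), ixor_assoc, xor_range_cons]
  · intro res lo h hle
    rw [alignLoop, dif_neg h]
    show tailLoop res (lo + (PySem.Int.floordiv (hi - lo + 1) 4) * 4) hi
        = Int.xor res (xor_range lo hi)
    by_cases hgt : hi < lo
    · have hlo : lo = hi + 1 := by omega
      subst hlo
      have hz : PySem.Int.floordiv (hi - (hi + 1) + 1) 4 = 0 := by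
        rw [show hi - (hi + 1) + 1 = 0 by ring,
          PySem.Int.floordiv_eq_ediv_of_pos (by norm_num)]
        norm_num
      rw [hz, zero_mul, add_zero, tail_char hi res (hi + 1) (by omega), xor_range_empty,
        ixor_zero]
    · have hlohi : lo ≤ hi := by omega
      have hmod : PySem.Int.mod lo 4 = 0 := by tauto
      rw [PySem.Int.mod_eq_emod_of_pos (by norm_num)] at hmod
      obtain ⟨a, rfl⟩ : ∃ a, lo = 4 * a := ⟨lo / 4, by omega⟩
      set t := PySem.Int.floordiv (hi - 4 * a + 1) 4 with hts
      have htdef : t = (hi - 4 * a + 1) / 4 := by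
        rw [hts, PySem.Int.floordiv_eq_ediv_of_pos (by norm_num)]
      have ht0 : 0 ≤ t := by rw [htdef]; omega
      have ht4 : 4 * t ≤ hi - 4 * a + 1 := by rw [htdef]; omega
      rw [tail_char hi res (4 * a + t * 4) (by omega)]
      rw [← xor_range_split (4 * a) (4 * a + t * 4) hi,
        show 4 * a + t * 4 - 1 = 4 * a + 4 * t - 1 by ring, xr_skip a t ht0, zero_ixor]

-- one iteration of A's loop body equals the row XOR (row [lo, lo+m], m+1 cells)
theorem row_step (res lo : Int) (m : Nat) :
    (if lo ≠ lo + (m : Int) then Int.xor res (xor_range lo (lo + (m : Int)))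
      else Int.xor res lo)
      = Int.xor res (xor_range lo (lo + (m : Int))) := by
  by_cases he : lo = lo + (m : Int)
  · rw [if_neg (by simpa using he), ← he, xor_range_self]
  · rw [if_pos he]

-- A's fuelled while loop, started with length = fuel and end = pos + step * fuel,
-- is the fold of the row XORs
theorem loopA_fold : ∀ (f : Nat) (pos step res : Int), 0 < step →
    solutionLoop f pos (pos + step * f) step (f : Int) res
      = (List.range f).foldl
          (fun (r : Int) (k : Nat) =>
            Int.xor r (xor_range (pos + (k : Int) * step)
              (pos + (k : Int) * step + ((f : Int) - (k : Int)) - 1)))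
          res := by
  intro f
  induction f with
  | zero => intro pos step res _; rfl
  | succ f ih =>
      intro pos step res hstep
      have hpos : pos < pos + step * ((f : Nat) + 1 : Nat) := by
        have h1 : (0 : Int) < step * ((f : Nat) + 1 : Nat) :=
          mul_pos hstep (by push_cast; omega)
        omega
      simp only [solutionLoop, if_pos hpos]
      have hmx : pos + (((f : Nat) + 1 : Nat) : Int) - 1 = pos + (f : Int) := by
        push_cast; ring
      rw [hmx, row_step res pos f]
      have hend : pos + step * (((f : Nat) + 1 : Nat) : Int)
          = (pos + step) + step * (f : Int) := by push_cast; ring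
      have hlen : (((f : Nat) + 1 : Nat) : Int) - 1 = (f : Int) := by push_cast; ring
      rw [hend, hlen, ih (pos + step) step _ hstep]
      rw [List.range_succ_eq_map, List.foldl_cons, List.foldl_map]
      congr 1
      · funext r k
        congr 2
        · push_cast; ring
        · push_cast; ring
      · congr 2
        · push_cast; ring
        · push_cast; ring

-- ===== VERDICT (by name: the statement is the Claim_ definition above) =====
theorem solution_spec : Claim_equal_solution := by
  unfold Claim_equal_solution
  intro start length _ hpre
  unfold Spec_solution solution solution_alt
  obtain ⟨n, rfl⟩ : ∃ n : Nat, length = (n : Int) :=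
    ⟨length.toNat, (Int.toNat_of_nonneg hpre).symm⟩
  have htn : ((n : Int)).toNat = n := by omega
  rw [htn]
  rcases Nat.eq_zero_or_pos n with h0 | hposn
  · subst h0
    rw [show ((0 : Nat) : Int) = 0 from rfl, PySem.List.pyRange_one_eq_nil (le_refl (0 : Int))]
    rfl
  · have hstep : (0 : Int) < (n : Int) := by exact_mod_cast hposn
    have he : start + ((n : Int)) ^ 2 = start + (n : Int) * (n : Int) := by ring
    rw [he, loopA_fold n start (n : Int) 0 hstep]
    rw [PySem.List.pyRange_one]
    have hlen : (((n : Int)) - 0).toNat = n := by omega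
    rw [hlen, List.foldl_map]
    apply PySem.List.foldl_congr_mem
    intro r k hkmem
    have hk : k < n := List.mem_range.mp hkmem
    trans (Int.xor r (xor_range (start + (0 + (k : Int)) * (n : Int))
        (start + (0 + (k : Int)) * (n : Int) + ((n : Int) - (0 + (k : Int))) - 1)))
    · congr 2
      · ring
      · ring
    · exact (row_char
        (start + (0 + (k : Int)) * (n : Int) + ((n : Int) - (0 + (k : Int))) - 1) r
        (start + (0 + (k : Int)) * (n : Int)) (by omega)).symm
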